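-- pv_equiv track=rewrite | github.com/harrystech/arthur-redshift-etl | python/etl/extract/spark.py | _suggest_best_partition_number
-- ===== SOURCE A (Python) =====
-- def _suggest_best_partition_number(table_size: int) -> int:
--     """
--     Suggest number of partitions based on the table size (in bytes).  Number of partitions is always
--     a factor of 2.
--
--     The number of partitions is based on:
--       Small tables (<= 10M): Use partitions around 1MB.
--       Medium tables (<= 1G): Use partitions around 10MB.
--       Huge tables (> 1G): Use partitions around 20MB.
--
--     >>> suggest_best_partition_number(100)
--     1
--     >>> suggest_best_partition_number(1048576)
--     1
--     >>> suggest_best_partition_number(3 * 1048576)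
--     2
--     >>> suggest_best_partition_number(10 * 1048576)
--     8
--     >>> suggest_best_partition_number(100 * 1048576)
--     8
--     >>> suggest_best_partition_number(2000 * 1048576)
--     16
--     """
--     meg = 1024 * 1024
--     if table_size <= 10 * meg:
--         target = 1 * meg
--     elif table_size <= 1024 * meg:
--         target = 10 * meg
--     else:
--         target = 20 * meg
--
--     num_partitions = 1
--     partition_size = table_size
--     # Keep the partition sizes above the target value:
--     while partition_size >= target * 2:
--         num_partitions *= 2
--         partition_size //= 2
--
--     return num_partitions
-- ===== SOURCE B (Python) =====
-- def _suggest_best_partition_number(table_size: int) -> int: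
--     meg = 1024 * 1024
--     if table_size <= 10 * meg:
--         target = 1 * meg
--     elif table_size <= 1024 * meg:
--         target = 10 * meg
--     else:
--         target = 20 * meg
--     # Smallest power of two strictly greater than floor(table_size / (2*target)).
--     m = max(table_size // (2 * target), 0)
--     return 1 << m.bit_length()
-- ===== Notes on version B (the rewrite author's own statement) =====
-- stated objective: simpler
-- what changed: Replaces A's repeated-halving loop (which doubles a counter until the partition size drops below twice the target) with a closed form: clamp m = table_size // (2*target) to be non-negative and shift one left by m.bit_length(), giving the smallest power of two strictly greater than m.
import Mathlib
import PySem

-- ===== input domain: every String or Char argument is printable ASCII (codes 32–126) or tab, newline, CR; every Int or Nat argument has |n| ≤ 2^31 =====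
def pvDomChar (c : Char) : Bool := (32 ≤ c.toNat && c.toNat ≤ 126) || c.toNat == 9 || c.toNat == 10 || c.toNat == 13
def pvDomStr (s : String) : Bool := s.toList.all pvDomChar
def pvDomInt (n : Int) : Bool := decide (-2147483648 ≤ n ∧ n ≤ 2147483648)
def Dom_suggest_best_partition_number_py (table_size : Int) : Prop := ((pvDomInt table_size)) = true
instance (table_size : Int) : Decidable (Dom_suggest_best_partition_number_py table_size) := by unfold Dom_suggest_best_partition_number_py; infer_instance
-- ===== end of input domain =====

-- B replaces A's halving loop by a closed form: the answer is the smallest power of two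
-- strictly greater than table_size // (2*target), i.e. 1 << m.bit_length() with m clamped to 0 (objective: simpler).

-- ===== PORT A =====
-- the 'while partition_size >= target * 2' loop; the extra '1 ≤ target' conjunct only
-- establishes termination and is invariantly true at every call site (target ∈ {1,10,20} MB).
def pvLoopA (target num ps : Int) : Int :=
  if h : target * 2 ≤ ps ∧ 1 ≤ target then
    pvLoopA target (num * 2) (PySem.Int.floordiv ps 2)
  else num
termination_by ps.toNat
decreasing_by
  rw [PySem.Int.floordiv_eq_ediv_of_pos (by omega : (0:Int) < 2)]
  omega

def suggest_best_partition_number_py (table_size : Int) : Int :=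
  let meg : Int := 1024 * 1024
  let target : Int :=
    if table_size ≤ 10 * meg then 1 * meg
    else if table_size ≤ 1024 * meg then 10 * meg
    else 20 * meg
  pvLoopA target 1 table_size

-- ===== PORT B =====
def suggest_best_partition_number_py_alt (table_size : Int) : Int :=
  let meg : Int := 1024 * 1024
  let target : Int :=
    if table_size ≤ 10 * meg then 1 * meg
    else if table_size ≤ 1024 * meg then 10 * meg
    else 20 * meg
  let m : Int := max (PySem.Int.floordiv table_size (2 * target)) 0
  (1 : Int) <<< PySem.Int.bitLength m

-- ===== PRECONDITION & SPEC =====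
def Spec_suggest_best_partition_number_py (table_size : Int) (out : Int) : Prop := out = suggest_best_partition_number_py_alt table_size
instance (table_size : Int) (out : Int) : Decidable (Spec_suggest_best_partition_number_py table_size out) := by unfold Spec_suggest_best_partition_number_py; infer_instance

-- ===== CLAIM (what is proved, stated in full; the proofs are below) =====
def Claim_equal_suggest_best_partition_number_py : Prop := ∀ (table_size : Int), Dom_suggest_best_partition_number_py table_size → Spec_suggest_best_partition_number_py table_size (suggest_best_partition_number_py table_size)

-- ===== LEMMAS AND PROOFS =====

theorem pvLoopA_eq (target : Int) (ht : 1 ≤ target) :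
    ∀ fuel ps num, ps.toNat ≤ fuel →
      pvLoopA target num ps =
        num * ((1 : Int) <<< PySem.Int.bitLength (max (PySem.Int.floordiv ps (2 * target)) 0)) := by
  intro fuel
  induction fuel with
  | zero =>
    intro ps num hps
    have hps0 : ps ≤ 0 := by omega
    rw [pvLoopA]
    rw [dif_neg (by push_neg; intro h; omega)]
    have hm : PySem.Int.floordiv ps (2 * target) < 1 :=
      (PySem.Int.floordiv_lt_iff_lt_mul (by omega)).mpr (by nlinarith)
    have : max (PySem.Int.floordiv ps (2 * target)) 0 = 0 := by omega
    rw [this]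
    norm_num [PySem.Int.bitLength, PySem.Int.bitLengthAux]
  | succ n ih =>
    intro ps num hps
    rw [pvLoopA]
    by_cases h : target * 2 ≤ ps
    · rw [dif_pos ⟨h, ht⟩]
      have hps2 : PySem.Int.floordiv ps 2 = ps / 2 :=
        PySem.Int.floordiv_eq_ediv_of_pos (by omega)
      have hrec := ih (PySem.Int.floordiv ps 2) (num * 2) (by rw [hps2]; omega)
      rw [hrec]
      -- the inner floordiv composes: (ps // 2) // (2*target) = (ps // (2*target)) // 2
      have hcomp : PySem.Int.floordiv (PySem.Int.floordiv ps 2) (2 * target)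
          = PySem.Int.floordiv (PySem.Int.floordiv ps (2 * target)) 2 := by
        rw [hps2,
          PySem.Int.floordiv_eq_ediv_of_pos (by omega : (0:Int) < 2 * target),
          PySem.Int.floordiv_eq_ediv_of_pos (by omega : (0:Int) < 2 * target),
          PySem.Int.floordiv_eq_ediv_of_pos (by omega : (0:Int) < 2),
          Int.ediv_ediv_of_nonneg (by omega : (0:Int) ≤ 2),
          Int.ediv_ediv_of_nonneg (by omega : (0:Int) ≤ 2 * target),
          mul_comm]
      set m := PySem.Int.floordiv ps (2 * target) with hm
      have hm1 : 1 ≤ m := (PySem.Int.le_floordiv_iff_mul_le (by omega)).mpr (by nlinarith)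
      have hm2 : 0 ≤ PySem.Int.floordiv m 2 := by
        rw [PySem.Int.floordiv_eq_ediv_of_pos (by omega : (0:Int) < 2)]; omega
      have hmax : max m 0 = m := by omega
      have hmax2 : max (PySem.Int.floordiv m 2) 0 = PySem.Int.floordiv m 2 := by omega
      rw [hcomp, hmax, hmax2, PySem.Int.bitLength_of_pos (by omega : (0:Int) < m)]
      rw [Int.shiftLeft_eq', Int.shiftLeft_eq', pow_succ]
      push_cast
      ring
    · rw [dif_neg (by push_neg; intro h'; omega)]
      have hmlt : PySem.Int.floordiv ps (2 * target) < 1 :=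
        (PySem.Int.floordiv_lt_iff_lt_mul (by omega)).mpr (by nlinarith)
      have : max (PySem.Int.floordiv ps (2 * target)) 0 = 0 := by omega
      rw [this]
      norm_num [PySem.Int.bitLength, PySem.Int.bitLengthAux]

-- ===== VERDICT (by name: the statement is the Claim_ definition above) =====
theorem suggest_best_partition_number_py_spec : Claim_equal_suggest_best_partition_number_py := by
  intro t _
  unfold Spec_suggest_best_partition_number_py
  unfold suggest_best_partition_number_py suggest_best_partition_number_py_alt
  simp only []
  split_ifs with h1 h2 <;>
    rw [pvLoopA_eq _ (by omega) t.toNat t 1 le_rfl, one_mul]
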